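-- pv_equiv track=rewrite | github.com/suuppon/AlgorithmPS | 2566.py | FindMatrixMaximum
-- ===== SOURCE A (Python) =====
-- def FindMatrixMaximum(matrix):
--     rowmaxdict = {}
--
--     for i in range(len(matrix)):
--         for j in range(len(matrix[i])):
--             row_max = max(matrix[i])
--             if matrix[i][j] == row_max:
--                 rowmaxdict["{} {}".format(i+1, j+1)] =  matrix[i][j]
--
--     max_value = max(rowmaxdict.values())
--
--     for key in rowmaxdict.keys():
--         if rowmaxdict[key] == max_value:
--             max_key = key
--
--     return(max_key, max_value)
-- ===== SOURCE B (Python) =====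
-- def FindMatrixMaximum(matrix):
--     max_value = max(v for row in matrix for v in row)
--     for i, row in reversed(list(enumerate(matrix))):
--         for j, v in reversed(list(enumerate(row))):
--             if v == max_value:
--                 return ("{} {}".format(i + 1, j + 1), max_value)
-- ===== Notes on version B (the rewrite author's own statement) =====
-- stated objective: faster
-- what changed: Replaces A's dict of row-maximum cells plus two forward passes (dict build with max(row) recomputed per cell, then a scan for the last key with the global max) with a single max over the flattened matrix followed by a reverse row-major scan that returns at the first cell equal to that max.
import Mathlib
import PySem

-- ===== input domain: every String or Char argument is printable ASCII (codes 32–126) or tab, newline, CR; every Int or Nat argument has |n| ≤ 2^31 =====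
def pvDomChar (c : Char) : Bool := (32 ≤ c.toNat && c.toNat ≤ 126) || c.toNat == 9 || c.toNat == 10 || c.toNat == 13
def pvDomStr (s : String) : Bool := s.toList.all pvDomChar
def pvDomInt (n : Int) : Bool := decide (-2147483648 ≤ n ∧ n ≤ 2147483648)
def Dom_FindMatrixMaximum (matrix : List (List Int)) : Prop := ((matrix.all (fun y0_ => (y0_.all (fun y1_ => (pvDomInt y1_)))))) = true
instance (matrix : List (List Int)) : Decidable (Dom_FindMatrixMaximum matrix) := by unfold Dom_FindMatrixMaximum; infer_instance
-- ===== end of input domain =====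

-- B replaces A's row-max dict build plus two forward scans by one max over all entries
-- followed by a reverse row-major scan (alternative algorithm; measured faster).


-- "{} {}".format(i+1, j+1), shared verbatim by both Pythons
def keyStr (i j : Int) : String :=
  String.ofList (PySem.Int.toChars (i + 1) ++ ' ' :: PySem.Int.toChars (j + 1))

-- ===== PORT A =====
def FindMatrixMaximum (matrix : List (List Int)) : String × Int :=
  let rowmaxdict : PySem.Dict String Int :=
    (PySem.List.pyRange 0 (matrix.length : Int) 1).foldl (fun d i =>
      (PySem.List.pyRange 0 ((PySem.List.pyGetD matrix i []).length : Int) 1).foldl (fun d j =>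
        -- max(matrix[i]) cannot raise here: the inner loop only runs when the row is nonempty
        let row_max := (PySem.List.max? (PySem.List.pyGetD matrix i []) (fun v => v)).getD 0
        if PySem.List.pyGetD (PySem.List.pyGetD matrix i []) j 0 = row_max then
          d.insert (keyStr i j) (PySem.List.pyGetD (PySem.List.pyGetD matrix i []) j 0)
        else d) d)
      PySem.Dict.empty
  -- max() raises ValueError when rowmaxdict is empty (matrix without entries): excluded by Pre_
  let max_value : Int := (PySem.List.max? rowmaxdict.values (fun v => v)).getD 0
  let max_key : String :=
    rowmaxdict.keys.foldl (fun acc k => if rowmaxdict.getD k 0 = max_value then k else acc) ""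
  (max_key, max_value)

-- ===== PORT B =====
def altRowScan (m : Int) (i : Int) : List (Int × Int) → Option (String × Int)
  | [] => none
  | (j, v) :: rest => if v = m then some (keyStr i j, m) else altRowScan m i rest

def altScan (m : Int) : List (Int × List Int) → Option (String × Int)
  | [] => none
  | (i, row) :: rest =>
    match altRowScan m i (PySem.List.enumerate row).reverse with
    | some r => some r
    | none => altScan m rest

def FindMatrixMaximum_alt (matrix : List (List Int)) : String × Int :=
  -- max() raises ValueError when the matrix has no entries: excluded by Pre_
  let max_value : Int := (PySem.List.max? matrix.flatten (fun v => v)).getD 0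
  -- Python's implicit None (loop finds nothing) is unreachable when the matrix has an entry
  (altScan max_value (PySem.List.enumerate matrix).reverse).getD ("", 0)

-- ===== PRECONDITION & SPEC =====
-- Pre_ excludes exactly the inputs (matrix with no entries at all) on which both Pythons raise ValueError.
def Pre_FindMatrixMaximum (matrix : List (List Int)) : Prop := matrix.flatten ≠ []
instance (matrix : List (List Int)) : Decidable (Pre_FindMatrixMaximum matrix) := by
  unfold Pre_FindMatrixMaximum; infer_instance

def pvWitness_FindMatrixMaximum : List (List Int) := [[1, 2], [3, 3], [2, 3]]

def Spec_FindMatrixMaximum (matrix : List (List Int)) (out : String × Int) : Prop := out = FindMatrixMaximum_alt matrix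
instance (matrix : List (List Int)) (out : String × Int) : Decidable (Spec_FindMatrixMaximum matrix out) := by unfold Spec_FindMatrixMaximum; infer_instance

-- ===== CLAIM (what is proved, stated in full; the proofs are below) =====
def Claim_equal_FindMatrixMaximum : Prop := ∀ (matrix : List (List Int)), Dom_FindMatrixMaximum matrix → Pre_FindMatrixMaximum matrix → Spec_FindMatrixMaximum matrix (FindMatrixMaximum matrix)

-- ===== LEMMAS AND PROOFS =====

-- ---------- digits / keyStr injectivity ----------
lemma digitChar_ne_space : ∀ d < 10, Nat.digitChar d ≠ ' ' := by decide

lemma digitChar_inj10 : ∀ d < 10, ∀ e < 10, Nat.digitChar d = Nat.digitChar e → d = e := by decide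

lemma toDigitsCore_eq (f : Nat) : ∀ (n : Nat) (acc : List Char), 0 < n → n ≤ f →
    Nat.toDigitsCore 10 f n acc = ((Nat.digits 10 n).map Nat.digitChar).reverse ++ acc := by
  induction f with
  | zero => intro n acc hn hf; omega
  | succ f ih =>
    intro n acc hn hf
    rw [Nat.digits_def' (by norm_num : (1:ℕ) < 10) hn]
    simp only [Nat.toDigitsCore]
    by_cases h : n / 10 = 0
    · simp [h, Nat.digits_zero]
    · rw [if_neg h, ih (n / 10) _ (Nat.pos_of_ne_zero h) (by have := Nat.div_lt_self hn (by norm_num : 1 < 10); omega)]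
      simp

lemma toChars_pos (n : Int) (h : 0 < n) :
    PySem.Int.toChars n = ((Nat.digits 10 n.toNat).map Nat.digitChar).reverse := by
  rw [PySem.Int.toChars, if_neg (by omega)]
  show Nat.toDigitsCore 10 (n.toNat + 1) n.toNat [] = _
  rw [toDigitsCore_eq (n.toNat + 1) n.toNat [] (by omega) (by omega)]
  simp

lemma space_not_mem_toChars (n : Int) (h : 0 < n) : ' ' ∉ PySem.Int.toChars n := by
  rw [toChars_pos n h]
  intro hmem
  simp only [List.mem_reverse, List.mem_map] at hmem
  obtain ⟨d, hd, hdc⟩ := hmem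
  exact digitChar_ne_space d (Nat.digits_lt_base (by norm_num) hd) hdc

lemma map_digitChar_inj : ∀ (l1 l2 : List Nat), (∀ x ∈ l1, x < 10) → (∀ x ∈ l2, x < 10) →
    l1.map Nat.digitChar = l2.map Nat.digitChar → l1 = l2 := by
  intro l1
  induction l1 with
  | nil => intro l2 _ _ h; cases l2 <;> simp_all
  | cons x l ih =>
    intro l2 h1 h2 h
    cases l2 with
    | nil => simp at h
    | cons y l2' =>
      simp only [List.map_cons, List.cons.injEq] at h
      have hx := digitChar_inj10 x (h1 x (by simp)) y (h2 y (by simp)) h.1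
      rw [hx, ih l2' (fun z hz => h1 z (by simp [hz])) (fun z hz => h2 z (by simp [hz])) h.2]

lemma toChars_inj_pos (a b : Int) (ha : 0 < a) (hb : 0 < b)
    (h : PySem.Int.toChars a = PySem.Int.toChars b) : a = b := by
  rw [toChars_pos a ha, toChars_pos b hb] at h
  have h2 := List.reverse_injective h
  have h3 := map_digitChar_inj _ _ (fun x hx => Nat.digits_lt_base (by norm_num) hx)
    (fun x hx => Nat.digits_lt_base (by norm_num) hx) h2
  have := Nat.digits_inj_iff.mp h3
  omega

lemma append_space_inj : ∀ (a c b d : List Char), ' ' ∉ a → ' ' ∉ c →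
    a ++ ' ' :: b = c ++ ' ' :: d → a = c ∧ b = d := by
  intro a
  induction a with
  | nil =>
    intro c b d _ hc h
    cases c with
    | nil => simpa using h
    | cons ch c' =>
      simp only [List.nil_append, List.cons_append, List.cons.injEq] at h
      obtain ⟨h1, -⟩ := h
      subst h1
      simp at hc
  | cons ch a' ih =>
    intro c b d ha hc h
    cases c with
    | nil =>
      simp only [List.cons_append, List.nil_append, List.cons.injEq] at h
      obtain ⟨h1, -⟩ := h
      subst h1
      simp at ha
    | cons ch2 c' =>
      simp only [List.cons_append, List.cons.injEq] at h
      have := ih c' b d (fun hm => ha (List.mem_cons_of_mem _ hm)) (fun hm => hc (List.mem_cons_of_mem _ hm)) h.2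
      exact ⟨by rw [h.1, this.1], this.2⟩

lemma keyStr_inj (a b c d : Int) (ha : 0 ≤ a) (hb : 0 ≤ b) (hc : 0 ≤ c) (hd : 0 ≤ d)
    (h : keyStr a b = keyStr c d) : a = c ∧ b = d := by
  have h' : PySem.Int.toChars (a + 1) ++ ' ' :: PySem.Int.toChars (b + 1)
      = PySem.Int.toChars (c + 1) ++ ' ' :: PySem.Int.toChars (d + 1) := by
    have := congrArg String.toList h; simpa [keyStr] using this
  obtain ⟨h1, h2⟩ := append_space_inj _ _ _ _ (space_not_mem_toChars _ (by omega)) (space_not_mem_toChars _ (by omega)) h'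
  have e1 := toChars_inj_pos _ _ (by omega) (by omega) h1
  have e2 := toChars_inj_pos _ _ (by omega) (by omega) h2
  omega

-- ---------- spec-side lists ----------
def keyStrN (i j : Nat) : String := keyStr i j

def rowmaxD (row : List Int) : Int := (PySem.List.max? row (fun v => v)).getD 0

def cellsRow (i : Nat) (row : List Int) : List (String × Int) :=
  (List.range row.length).map (fun j => (keyStrN i j, row.getD j 0))

def cellsN (matrix : List (List Int)) : List (String × Int) :=
  (List.range matrix.length).flatMap (fun i => cellsRow i (matrix.getD i []))

def rowHitsN (i : Nat) (row : List Int) : List (String × Int) :=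
  (List.range row.length).filterMap
    (fun j => if row.getD j 0 = rowmaxD row then some (keyStrN i j, row.getD j 0) else none)

def hitsN (matrix : List (List Int)) : List (String × Int) :=
  (List.range matrix.length).flatMap (fun i => rowHitsN i (matrix.getD i []))

def hitP (m : Int) (p : String × Int) : Option (String × Int) :=
  if p.2 = m then some (p.1, m) else none

def dictA (matrix : List (List Int)) : PySem.Dict String Int :=
  (List.range matrix.length).foldl (fun d i =>
    (List.range (matrix.getD i []).length).foldl (fun d j =>
      if (matrix.getD i []).getD j 0 = rowmaxD (matrix.getD i []) then
        d.insert (keyStrN i j) ((matrix.getD i []).getD j 0)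
      else d) d)
    PySem.Dict.empty

-- ---------- enumerate as range-map ----------
lemma enumerate_eq {α : Type} (dflt : α) : ∀ (xs : List α) (s : Int),
    PySem.List.enumerate xs s = (List.range xs.length).map (fun (k : Nat) => (s + (k : Int), xs.getD k dflt)) := by
  intro xs
  induction xs with
  | nil => intro s; simp [PySem.List.enumerate_nil]
  | cons x xs ih =>
    intro s
    rw [PySem.List.enumerate_cons, ih (s + 1)]
    rw [List.length_cons, List.range_succ_eq_map, List.map_cons, List.map_map]
    refine List.cons_eq_cons.mpr ⟨by simp, ?_⟩
    apply List.map_congr_left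
    intro k _
    simp only [Function.comp_apply, List.getD_cons_succ]
    refine Prod.ext ?_ rfl
    push_cast; ring

-- ---------- A: port equals dictA form ----------
lemma dictA_eq (matrix : List (List Int)) :
    (PySem.List.pyRange 0 (matrix.length : Int) 1).foldl (fun d i =>
      (PySem.List.pyRange 0 ((PySem.List.pyGetD matrix i []).length : Int) 1).foldl (fun d j =>
        let row_max := (PySem.List.max? (PySem.List.pyGetD matrix i []) (fun v => v)).getD 0
        if PySem.List.pyGetD (PySem.List.pyGetD matrix i []) j 0 = row_max then
          d.insert (keyStr i j) (PySem.List.pyGetD (PySem.List.pyGetD matrix i []) j 0)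
        else d) d)
      PySem.Dict.empty = dictA matrix := by
  unfold dictA
  rw [PySem.List.pyRange_zero_nat, List.foldl_map]
  apply PySem.List.foldl_congr_mem
  intro d k _
  simp only [PySem.List.pyGetD_natCast]
  rw [PySem.List.pyRange_zero_nat, List.foldl_map]
  apply PySem.List.foldl_congr_mem
  intro d' j _
  simp only [PySem.List.pyGetD_natCast, keyStrN, rowmaxD]

-- ---------- generic dict-build lemmas ----------
lemma contains_false_of_not_mem (d : PySem.Dict String Int) (k : String) (h : k ∉ d.keys) :
    d.contains k = false := by
  cases h2 : d.contains k
  · rfl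
  · exact absurd ((PySem.Dict.contains_iff_mem_keys d k).mp h2) h

lemma foldl_condInsert_items {β : Type} (P : β → Prop) [DecidablePred P] (K : β → String) (V : β → Int) :
    ∀ (l : List β) (d : PySem.Dict String Int),
      (l.filterMap (fun x => if P x then some (K x) else none)).Nodup →
      (∀ x ∈ l, P x → K x ∉ d.keys) →
      (l.foldl (fun d x => if P x then d.insert (K x) (V x) else d) d).items
        = d.items ++ l.filterMap (fun x => if P x then some (K x, V x) else none) := by
  intro l
  induction l with
  | nil => intro d _ _; simp
  | cons x l ih =>
    intro d hnd hfresh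
    by_cases hP : P x
    · simp only [List.foldl_cons, if_pos hP]
      simp only [List.filterMap_cons, if_pos hP] at hnd ⊢
      have hx : K x ∉ d.keys := hfresh x (by simp) hP
      have hc : d.contains (K x) = false := contains_false_of_not_mem d (K x) hx
      have hitems : (d.insert (K x) (V x)).items = d.items ++ [(K x, V x)] :=
        PySem.Dict.items_insert_of_not_contains d (V x) hc
      have hkeys : (d.insert (K x) (V x)).keys = d.keys ++ [K x] := by
        show (d.insert (K x) (V x)).items.map Prod.fst = _
        rw [hitems]; simp [PySem.Dict.keys]
      rw [ih (d.insert (K x) (V x)) (List.Nodup.of_cons hnd) ?_, hitems]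
      · simp
      · intro y hy hPy
        rw [hkeys]
        simp only [List.mem_append, List.mem_singleton]
        rintro (h1 | h1)
        · exact hfresh y (by simp [hy]) hPy h1
        · apply (List.nodup_cons.mp hnd).1
          rw [← h1]
          exact List.mem_filterMap.mpr ⟨y, hy, by simp [hPy]⟩
    · simp only [List.foldl_cons, if_neg hP]
      simp only [List.filterMap_cons, if_neg hP] at hnd ⊢
      exact ih d hnd (fun y hy hPy => hfresh y (by simp [hy]) hPy)

lemma foldl_blocks_items {β : Type} (H : β → PySem.Dict String Int → PySem.Dict String Int)
    (B : β → List (String × Int))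
    (hH : ∀ x d, ((B x).map Prod.fst).Nodup → (∀ p ∈ B x, p.1 ∉ d.keys) →
      (H x d).items = d.items ++ B x) :
    ∀ (l : List β) (d : PySem.Dict String Int),
      ((l.flatMap B).map Prod.fst).Nodup →
      (∀ p ∈ l.flatMap B, p.1 ∉ d.keys) →
      (l.foldl (fun d x => H x d) d).items = d.items ++ l.flatMap B := by
  intro l
  induction l with
  | nil => intro d _ _; simp
  | cons x l ih =>
    intro d hnd hfresh
    simp only [List.flatMap_cons, List.map_append] at hnd hfresh
    have hnd1 := (List.nodup_append.mp hnd).1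
    have hnd2 := (List.nodup_append.mp hnd).2.1
    have hdisj := (List.nodup_append.mp hnd).2.2
    have hitems : (H x d).items = d.items ++ B x :=
      hH x d hnd1 (fun p hp => hfresh p (List.mem_append_left _ hp))
    have hkeys : (H x d).keys = d.keys ++ (B x).map Prod.fst := by
      show (H x d).items.map Prod.fst = _
      rw [hitems]; simp [PySem.Dict.keys]
    simp only [List.foldl_cons]
    rw [ih (H x d) hnd2 ?_, hitems]
    · simp
    · intro p hp
      rw [hkeys]
      simp only [List.mem_append]
      rintro (h1 | h1)
      · exact hfresh p (List.mem_append_right _ hp) h1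
      · exact hdisj p.1 h1 p.1 (List.mem_map_of_mem hp) rfl

lemma filterMap_ite_sublist {β γ : Type} (P : β → Prop) [DecidablePred P] (f : β → γ) :
    ∀ (l : List β), (l.filterMap (fun x => if P x then some (f x) else none)).Sublist (l.map f) := by
  intro l
  induction l with
  | nil => simp
  | cons x l ih =>
    by_cases hP : P x
    · simpa [hP] using List.Sublist.cons₂ (f x) ih
    · simpa [hP] using List.Sublist.cons (f x) ih

lemma map_fst_rowHitsN (i : Nat) (row : List Int) :
    (rowHitsN i row).map Prod.fst = (List.range row.length).filterMap
      (fun j => if row.getD j 0 = rowmaxD row then some (keyStrN i j) else none) := by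
  rw [rowHitsN, List.map_filterMap]
  apply List.filterMap_congr
  intro j _
  split_ifs <;> simp [keyStrN]

lemma keyStrN_inj (i j i' j' : Nat) (h : keyStrN i j = keyStrN i' j') : i = i' ∧ j = j' := by
  have := keyStr_inj i j i' j' (Int.natCast_nonneg i) (Int.natCast_nonneg j)
    (Int.natCast_nonneg i') (Int.natCast_nonneg j') h
  omega

lemma nodup_keys_rowHitsN (i : Nat) (row : List Int) : ((rowHitsN i row).map Prod.fst).Nodup := by
  rw [map_fst_rowHitsN]
  apply List.Sublist.nodup (filterMap_ite_sublist _ _ _)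
  exact List.Nodup.map_on
    (fun j _ j' _ h => (keyStrN_inj i j i j' h).2) List.nodup_range

lemma mem_map_fst_rowHitsN (i : Nat) (row : List Int) (a : String)
    (ha : a ∈ (rowHitsN i row).map Prod.fst) : ∃ j, a = keyStrN i j := by
  rw [map_fst_rowHitsN] at ha
  obtain ⟨j, _, hj⟩ := List.mem_filterMap.mp ha
  rw [ite_eq_iff] at hj
  rcases hj with ⟨_, hj⟩ | ⟨_, hj⟩
  · exact ⟨j, (Option.some.inj hj).symm⟩
  · cases hj

lemma nodup_keys_hitsN (matrix : List (List Int)) : ((hitsN matrix).map Prod.fst).Nodup := by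
  rw [hitsN, List.map_flatMap]
  rw [List.nodup_flatMap]
  refine ⟨fun i _ => nodup_keys_rowHitsN i _, ?_⟩
  apply List.Pairwise.imp ?_ (List.nodup_range (n := matrix.length))
  intro i i' hne a ha ha'
  obtain ⟨j, rfl⟩ := mem_map_fst_rowHitsN i _ a ha
  obtain ⟨j', hj'⟩ := mem_map_fst_rowHitsN i' _ _ ha'
  exact hne (keyStrN_inj i j i' j' hj').1

lemma items_dictA (matrix : List (List Int)) : (dictA matrix).items = hitsN matrix := by
  rw [dictA]
  have := foldl_blocks_items
    (fun i d => (List.range (matrix.getD i []).length).foldl (fun d j =>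
      if (matrix.getD i []).getD j 0 = rowmaxD (matrix.getD i []) then
        d.insert (keyStrN i j) ((matrix.getD i []).getD j 0)
      else d) d)
    (fun i => rowHitsN i (matrix.getD i []))
    ?_ (List.range matrix.length) PySem.Dict.empty ?_ ?_
  · simpa [hitsN] using this
  · intro i d hnd hfresh
    have h2 := foldl_condInsert_items
      (fun j => (matrix.getD i []).getD j 0 = rowmaxD (matrix.getD i []))
      (fun j => keyStrN i j) (fun j => (matrix.getD i []).getD j 0)
      (List.range (matrix.getD i []).length) d
      (by rw [← map_fst_rowHitsN]; exact hnd)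
      (by
        intro j hj hPj
        apply hfresh (keyStrN i j, (matrix.getD i []).getD j 0)
        exact List.mem_filterMap.mpr ⟨j, hj, by rw [if_pos hPj]⟩)
    simpa [rowHitsN] using h2
  · rw [← hitsN]
    exact nodup_keys_hitsN matrix
  · intro p _
    simp [PySem.Dict.keys_empty]

-- ---------- value facts ----------
lemma hits_snd_mem_flatten (matrix : List (List Int)) (p : String × Int) (hp : p ∈ hitsN matrix) :
    p.2 ∈ matrix.flatten := by
  rw [hitsN] at hp
  obtain ⟨i, hi, hpi⟩ := List.mem_flatMap.mp hp
  obtain ⟨j, hj, hpj⟩ := List.mem_filterMap.mp hpi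
  rw [List.mem_range] at hi hj
  rw [ite_eq_iff] at hpj
  rcases hpj with ⟨_, hpj⟩ | ⟨_, hpj⟩
  · have hpe := Option.some.inj hpj
    subst hpe
    rw [List.mem_flatten]
    refine ⟨matrix.getD i [], ?_, ?_⟩
    · rw [List.getD_eq_getElem matrix [] hi]
      exact List.getElem_mem hi
    · show (matrix.getD i []).getD j 0 ∈ _
      rw [List.getD_eq_getElem _ 0 hj]
      exact List.getElem_mem hj
  · cases hpj

lemma M_mem_hits (matrix : List (List Int)) (M : Int)
    (hM : PySem.List.max? matrix.flatten (fun v => v) = some M) :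
    ∃ p ∈ hitsN matrix, p.2 = M := by
  have hMmem : M ∈ matrix.flatten := PySem.List.max?_mem hM
  have hle : ∀ v ∈ matrix.flatten, v ≤ M := PySem.List.max?_isMax hM
  obtain ⟨row, hrow, hMrow⟩ := List.mem_flatten.mp hMmem
  obtain ⟨i, hi, hieq⟩ := List.mem_iff_getElem.mp hrow
  obtain ⟨j, hj, hjeq⟩ := List.mem_iff_getElem.mp hMrow
  have hrowD : matrix.getD i [] = row := by rw [List.getD_eq_getElem matrix [] hi, hieq]
  have hrne : row ≠ [] := List.ne_nil_of_mem hMrow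
  have hrm : rowmaxD row = M := by
    rw [rowmaxD]
    cases hmx : PySem.List.max? row (fun v => v) with
    | none => exact absurd ((PySem.List.max?_eq_none_iff row fun v => v).mp hmx) hrne
    | some rm =>
      have h1 : rm ≤ M := hle rm (List.mem_flatten.mpr ⟨row, hrow, PySem.List.max?_mem hmx⟩)
      have h2 : M ≤ rm := PySem.List.max?_isMax hmx M hMrow
      simp [le_antisymm h1 h2]
  refine ⟨(keyStrN i j, row.getD j 0), ?_, ?_⟩
  · rw [hitsN]
    apply List.mem_flatMap.mpr
    refine ⟨i, List.mem_range.mpr hi, ?_⟩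
    rw [hrowD]
    apply List.mem_filterMap.mpr
    refine ⟨j, List.mem_range.mpr hj, ?_⟩
    rw [if_pos]
    rw [hrm, List.getD_eq_getElem _ 0 hj, hjeq]
  · rw [List.getD_eq_getElem _ 0 hj, hjeq]

lemma maxA_eq (matrix : List (List Int)) (M : Int)
    (hM : PySem.List.max? matrix.flatten (fun v => v) = some M) :
    PySem.List.max? ((hitsN matrix).map Prod.snd) (fun v => v) = some M := by
  obtain ⟨p, hp, hp2⟩ := M_mem_hits matrix M hM
  have hMv : M ∈ (hitsN matrix).map Prod.snd := hp2 ▸ List.mem_map_of_mem hp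
  cases hmx : PySem.List.max? ((hitsN matrix).map Prod.snd) (fun v => v) with
  | none => exact absurd ((PySem.List.max?_eq_none_iff _ fun v => v).mp hmx) (List.ne_nil_of_mem hMv)
  | some m' =>
    have h1 : M ≤ m' := PySem.List.max?_isMax hmx M hMv
    have hm'mem := PySem.List.max?_mem hmx
    obtain ⟨q, hq, hq2⟩ := List.mem_map.mp hm'mem
    have h2 : m' ≤ M :=
      PySem.List.max?_isMax hM m' (hq2 ▸ hits_snd_mem_flatten matrix q hq)
    rw [le_antisymm h2 h1]

-- ---------- pick-last fold ----------
lemma foldl_pick_last (M : Int) : ∀ (l : List (String × Int)) (a : String),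
    l.foldl (fun acc p => if p.2 = M then p.1 else acc) a
      = (l.filterMap (fun p => if p.2 = M then some p.1 else none)).getLastD a := by
  intro l
  induction l with
  | nil => intro a; simp
  | cons p l ih =>
    intro a
    by_cases hp : p.2 = M
    · simp only [List.foldl_cons, if_pos hp, List.filterMap_cons, List.getLastD_cons]
      exact ih p.1
    · simp only [List.foldl_cons, if_neg hp, List.filterMap_cons]
      exact ih a

-- ---------- B characterization ----------
lemma altRowScan_eq (m i : Int) : ∀ (l : List (Int × Int)),
    altRowScan m i l = l.findSome? (fun jv => if jv.2 = m then some (keyStr i jv.1, m) else none) := by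
  intro l
  induction l with
  | nil => rfl
  | cons jv l ih =>
    obtain ⟨j, v⟩ := jv
    rw [List.findSome?_cons]
    by_cases hv : v = m
    · simp [altRowScan, hv]
    · simp only [altRowScan, if_neg hv, ih]

lemma altScan_eq (m : Int) : ∀ (l : List (Int × List Int)),
    altScan m l = l.findSome? (fun ir => altRowScan m ir.1 (PySem.List.enumerate ir.2).reverse) := by
  intro l
  induction l with
  | nil => rfl
  | cons ir l ih =>
    obtain ⟨i, row⟩ := ir
    rw [List.findSome?_cons]
    cases h : altRowScan m i (PySem.List.enumerate row).reverse with
    | none => simp only [altScan, h, ih]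
    | some r => simp only [altScan, h]

lemma findSome?_reverse_eq_getLast? {β γ : Type} (f : β → Option γ) : ∀ (l : List β),
    l.reverse.findSome? f = (l.filterMap f).getLast? := by
  intro l
  induction l with
  | nil => rfl
  | cons x l ih =>
    rw [List.reverse_cons, List.findSome?_append, ih, List.filterMap_cons]
    cases h : f x with
    | none => simp [h]
    | some b =>
      simp only [h, List.getLast?_cons, List.findSome?_cons]
      cases hfl : (l.filterMap f).getLast? <;> simp

lemma findSome?_reverse_getLast?_flat {β γ : Type} (F : β → List γ) : ∀ (l : List β),
    l.reverse.findSome? (fun x => (F x).getLast?) = (l.flatMap F).getLast? := by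
  intro l
  induction l with
  | nil => rfl
  | cons x l ih =>
    rw [List.reverse_cons, List.findSome?_append, ih, List.flatMap_cons, List.getLast?_append]
    simp [List.findSome?_cons]
    cases h : (F x).getLast? <;> simp


-- ---------- row-max identification and the hits/cells bridge ----------
lemma rowmaxD_eq (matrix : List (List Int)) (M : Int)
    (hM : PySem.List.max? matrix.flatten (fun v => v) = some M)
    (row : List Int) (hrow : row ∈ matrix) (hMrow : M ∈ row) : rowmaxD row = M := by
  have hle : ∀ v ∈ matrix.flatten, v ≤ M := PySem.List.max?_isMax hM
  rw [rowmaxD]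
  cases hmx : PySem.List.max? row (fun v => v) with
  | none => exact absurd ((PySem.List.max?_eq_none_iff row fun v => v).mp hmx) (List.ne_nil_of_mem hMrow)
  | some rm =>
    have h1 : rm ≤ M := hle rm (List.mem_flatten.mpr ⟨row, hrow, PySem.List.max?_mem hmx⟩)
    have h2 : M ≤ rm := PySem.List.max?_isMax hmx M hMrow
    simp [le_antisymm h1 h2]

lemma filter_hits_eq (matrix : List (List Int)) (M : Int)
    (hM : PySem.List.max? matrix.flatten (fun v => v) = some M) :
    (hitsN matrix).filterMap (hitP M) = (cellsN matrix).filterMap (hitP M) := by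
  have hle : ∀ v ∈ matrix.flatten, v ≤ M := PySem.List.max?_isMax hM
  rw [hitsN, cellsN, List.filterMap_flatMap, List.filterMap_flatMap]
  apply List.flatMap_congr
  intro i hi
  rw [List.mem_range] at hi
  have hrowmem : matrix.getD i [] ∈ matrix := by
    rw [List.getD_eq_getElem matrix [] hi]; exact List.getElem_mem hi
  rw [rowHitsN, cellsRow, List.filterMap_filterMap, List.filterMap_map]
  apply List.filterMap_congr
  intro j hj
  rw [List.mem_range] at hj
  have hjmem : (matrix.getD i []).getD j 0 ∈ matrix.getD i [] := by
    rw [List.getD_eq_getElem _ 0 hj]; exact List.getElem_mem hj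
  simp only [Function.comp_apply, hitP, keyStrN]
  by_cases hrmax : (matrix.getD i []).getD j 0 = rowmaxD (matrix.getD i [])
  · rw [if_pos hrmax, Option.bind_some]
  · rw [if_neg hrmax, Option.bind_none]
    by_cases hcell : (matrix.getD i []).getD j 0 = M
    · exact absurd (by rw [hcell, rowmaxD_eq matrix M hM _ hrowmem (hcell ▸ hjmem)]) hrmax
    · rw [if_neg hcell]

lemma B_char (matrix : List (List Int)) (M : Int) :
    altScan M (PySem.List.enumerate matrix).reverse = ((cellsN matrix).filterMap (hitP M)).getLast? := by
  rw [altScan_eq]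
  have hfn : (fun (ir : Int × List Int) => altRowScan M ir.1 (PySem.List.enumerate ir.2).reverse)
      = (fun ir => ((PySem.List.enumerate ir.2).filterMap
          (fun jv => if jv.2 = M then some (keyStr ir.1 jv.1, M) else none)).getLast?) := by
    funext ir
    rw [altRowScan_eq, findSome?_reverse_eq_getLast?]
  rw [hfn, findSome?_reverse_getLast?_flat]
  congr 1
  rw [enumerate_eq ([] : List Int) matrix 0, List.flatMap_map, cellsN, List.filterMap_flatMap]
  apply List.flatMap_congr
  intro k _
  rw [enumerate_eq (0 : Int) (matrix.getD k []) 0, List.filterMap_map, cellsRow, List.filterMap_map]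
  apply List.filterMap_congr
  intro j _
  simp only [Function.comp_apply, hitP, keyStrN, zero_add]

-- ---------- assembling both sides ----------
lemma keys_dictA (matrix : List (List Int)) : (dictA matrix).keys = (hitsN matrix).map Prod.fst := by
  show (dictA matrix).items.map Prod.fst = _
  rw [items_dictA]

lemma values_dictA (matrix : List (List Int)) : (dictA matrix).values = (hitsN matrix).map Prod.snd := by
  show (dictA matrix).items.map Prod.snd = _
  rw [items_dictA]

lemma A_char (matrix : List (List Int)) (M : Int)
    (hM : PySem.List.max? matrix.flatten (fun v => v) = some M) :
    FindMatrixMaximum matrix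
      = ((((cellsN matrix).filterMap (hitP M)).map Prod.fst).getLastD "", M) := by
  have hnodup : (dictA matrix).keys.Nodup := by
    rw [keys_dictA]; exact nodup_keys_hitsN matrix
  have hmaxv : (PySem.List.max? (dictA matrix).values (fun v => v)).getD 0 = M := by
    rw [values_dictA, maxA_eq matrix M hM]; rfl
  simp only [FindMatrixMaximum, dictA_eq matrix, hmaxv]
  refine Prod.ext ?_ rfl
  show (dictA matrix).keys.foldl (fun acc k => if (dictA matrix).getD k 0 = M then k else acc) "" = _
  rw [keys_dictA, List.foldl_map]
  rw [PySem.List.foldl_congr_mem ((hitsN matrix))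
      (fun acc p => if (dictA matrix).getD p.1 0 = M then p.1 else acc)
      (fun acc p => if p.2 = M then p.1 else acc) ""
      (by
        intro acc p hp
        have h2 : (dictA matrix).getD p.1 0 = p.2 :=
          PySem.Dict.getD_of_mem_items (dictA matrix) (items_dictA matrix ▸ hp) hnodup 0
        simp only [h2])]
  rw [foldl_pick_last M (hitsN matrix) ""]
  have hmapfst : (hitsN matrix).filterMap (fun p => if p.2 = M then some p.1 else none)
      = ((hitsN matrix).filterMap (hitP M)).map Prod.fst := by
    rw [List.map_filterMap]
    apply List.filterMap_congr
    intro p _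
    by_cases hp : p.2 = M <;> simp [hitP, hp]
  rw [hmapfst, filter_hits_eq matrix M hM]

lemma L_ne_nil (matrix : List (List Int)) (M : Int)
    (hM : PySem.List.max? matrix.flatten (fun v => v) = some M) :
    (cellsN matrix).filterMap (hitP M) ≠ [] := by
  obtain ⟨p, hp, hp2⟩ := M_mem_hits matrix M hM
  rw [← filter_hits_eq matrix M hM]
  intro hnil
  have : (p.1, M) ∈ (hitsN matrix).filterMap (hitP M) :=
    List.mem_filterMap.mpr ⟨p, hp, by simp [hitP, hp2]⟩
  rw [hnil] at this
  cases this

lemma snd_mem_filter_hitP (matrix : List (List Int)) (M : Int) (q : String × Int)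
    (hq : q ∈ (cellsN matrix).filterMap (hitP M)) : q.2 = M := by
  obtain ⟨p, _, hp⟩ := List.mem_filterMap.mp hq
  rw [hitP, ite_eq_iff] at hp
  rcases hp with ⟨_, hp⟩ | ⟨_, hp⟩
  · rw [← Option.some.inj hp]
  · cases hp

-- ===== VERDICT (by name: the statement is the Claim_ definition above) =====
theorem FindMatrixMaximum_spec : Claim_equal_FindMatrixMaximum := by
  intro matrix _ hpre
  unfold Spec_FindMatrixMaximum
  obtain ⟨M, hM⟩ : ∃ M, PySem.List.max? matrix.flatten (fun v => v) = some M := by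
    cases h : PySem.List.max? matrix.flatten (fun v => v) with
    | none => exact absurd ((PySem.List.max?_eq_none_iff _ _).mp h) hpre
    | some M => exact ⟨M, rfl⟩
  have hne := L_ne_nil matrix M hM
  have hlast := List.getLast?_eq_some_getLast hne
  rw [A_char matrix M hM]
  simp only [FindMatrixMaximum_alt, hM, Option.getD_some, B_char matrix M]
  rw [hlast]
  rw [List.getLastD_eq_getLast?, List.getLast?_map, hlast]
  refine Prod.ext rfl ?_
  exact (snd_mem_filter_hitP matrix M _ (List.getLast_mem hne)).symm
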